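-- pv_equiv track=rewrite | github.com/epilectrik/voynich | validate_plants.py | parse_word
-- ===== SOURCE A (Python) =====
-- PREFIX = {
--     'ot': 'time', 'ok': 'sky', 'ar': 'air', 'al': 'star', 'yk': 'cycle',
--     'yt': 'world', 'or': 'gold/sun', 'qo': 'body', 'ol': 'fluid', 'so': 'health',
--     'ct': 'water', 'cth': 'water', 'da': 'leaf', 'ch': 'plant', 'sh': 'juice',
--     'lk': 'liquid', 'op': 'work', 'pc': 'mix', 'sa': 'seed',
-- }
--
-- SUFFIX = {
--     'y': 'noun', 'aiin': 'place', 'ain': 'action', 'iin': 'thing', 'in': 'acc',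
--     'dy': 'done', 'ey': 'doing', 'hy': 'full', 'ky': 'like',
--     'ly': 'type', 'ty': 'quality', 'ry': 'maker',
--     'ar': 'of', 'or': 'doer', 'al': 'adj', 'ol': 'small',
-- }
--
-- def parse_word(word):
--     if not word or len(word) < 2:
--         return None, word, None
--     prefix = None
--     rest = word
--     for p in sorted(PREFIX.keys(), key=len, reverse=True):
--         if word.startswith(p):
--             prefix = p
--             rest = word[len(p):]
--             break
--     suffix = None
--     middle = rest
--     for s in sorted(SUFFIX.keys(), key=len, reverse=True):
--         if rest.endswith(s) and len(rest) > len(s):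
--             suffix = s
--             middle = rest[:-len(s)]
--             break
--     return prefix, middle, suffix
-- ===== SOURCE B (Python) =====
-- PREFIX = {
--     'ot': 'time', 'ok': 'sky', 'ar': 'air', 'al': 'star', 'yk': 'cycle',
--     'yt': 'world', 'or': 'gold/sun', 'qo': 'body', 'ol': 'fluid', 'so': 'health',
--     'ct': 'water', 'cth': 'water', 'da': 'leaf', 'ch': 'plant', 'sh': 'juice',
--     'lk': 'liquid', 'op': 'work', 'pc': 'mix', 'sa': 'seed',
-- }
--
-- SUFFIX = {
--     'y': 'noun', 'aiin': 'place', 'ain': 'action', 'iin': 'thing', 'in': 'acc',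
--     'dy': 'done', 'ey': 'doing', 'hy': 'full', 'ky': 'like',
--     'ly': 'type', 'ty': 'quality', 'ry': 'maker',
--     'ar': 'of', 'or': 'doer', 'al': 'adj', 'ol': 'small',
-- }
--
-- def parse_word(word):
--     # Iterate over candidate lengths (longest first) instead of over the sorted key set.
--     if not word or len(word) < 2:
--         return None, word, None
--     prefix, rest = None, word
--     for L in (3, 2):
--         if word[:L] in PREFIX:
--             prefix, rest = word[:L], word[L:]
--             break
--     suffix, middle = None, rest
--     for L in (4, 3, 2, 1):
--         if len(rest) > L and rest[-L:] in SUFFIX: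
--             suffix, middle = rest[-L:], rest[:-L]
--             break
--     return prefix, middle, suffix
-- ===== Notes on version B (the rewrite author's own statement) =====
-- stated objective: alternative
-- what changed: B drops A's per-call sort of the key sets and instead counts candidate affix lengths down (3,2 for prefixes; 4..1 for suffixes), testing one slice per length by dict membership.
import Mathlib
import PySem

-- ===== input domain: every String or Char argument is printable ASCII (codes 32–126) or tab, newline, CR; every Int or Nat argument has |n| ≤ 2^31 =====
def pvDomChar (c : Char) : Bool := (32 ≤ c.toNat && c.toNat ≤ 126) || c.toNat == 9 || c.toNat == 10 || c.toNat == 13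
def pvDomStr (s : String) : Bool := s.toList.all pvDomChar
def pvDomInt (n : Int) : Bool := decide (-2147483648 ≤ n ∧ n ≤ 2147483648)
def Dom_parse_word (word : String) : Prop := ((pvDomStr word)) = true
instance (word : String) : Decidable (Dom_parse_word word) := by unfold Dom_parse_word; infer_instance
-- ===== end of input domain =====

-- B replaces A's per-call sort of the key set by a countdown over candidate affix lengths with dict membership tests; equal return value everywhere (objective: alternative decomposition).

-- ===== PORT A =====
-- module constants PREFIX / SUFFIX (keys as code-point lists; values kept but never read by parse_word)
def pwPREFIX : PySem.Dict (List Char) String := PySem.Dict.ofList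
  [("ot".toList, "time"), ("ok".toList, "sky"), ("ar".toList, "air"), ("al".toList, "star"),
   ("yk".toList, "cycle"), ("yt".toList, "world"), ("or".toList, "gold/sun"), ("qo".toList, "body"),
   ("ol".toList, "fluid"), ("so".toList, "health"), ("ct".toList, "water"), ("cth".toList, "water"),
   ("da".toList, "leaf"), ("ch".toList, "plant"), ("sh".toList, "juice"), ("lk".toList, "liquid"),
   ("op".toList, "work"), ("pc".toList, "mix"), ("sa".toList, "seed")]

def pwSUFFIX : PySem.Dict (List Char) String := PySem.Dict.ofList
  [("y".toList, "noun"), ("aiin".toList, "place"), ("ain".toList, "action"), ("iin".toList, "thing"),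
   ("in".toList, "acc"), ("dy".toList, "done"), ("ey".toList, "doing"), ("hy".toList, "full"),
   ("ky".toList, "like"), ("ly".toList, "type"), ("ty".toList, "quality"), ("ry".toList, "maker"),
   ("ar".toList, "of"), ("or".toList, "doer"), ("al".toList, "adj"), ("ol".toList, "small")]

-- A's first loop: first sorted prefix key p with word.startswith(p); break → (prefix, word[len(p):])
def pwMatchPrefix : List (List Char) → List Char → Option (List Char) × List Char
  | [], w => (none, w)
  | p :: ps, w =>
    if PySem.Chars.startswith w p then (some p, PySem.List.slice w (some (p.length : Int)) none)
    else pwMatchPrefix ps w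

-- A's second loop: first sorted suffix key s with rest.endswith(s) and len(rest) > len(s); break → (suffix, rest[:-len(s)])
def pwMatchSuffix : List (List Char) → List Char → Option (List Char) × List Char
  | [], r => (none, r)
  | s :: ss, r =>
    if PySem.Chars.endswith r s && decide (s.length < r.length) then
      (some s, PySem.List.slice r none (some (-(s.length : Int))))
    else pwMatchSuffix ss r

def parse_word (word : String) : Option String × Option String × Option String :=
  if word = "" ∨ PySem.Str.len word < 2 then (none, some word, none)
  else
    let pr := pwMatchPrefix (PySem.List.sorted pwPREFIX.keys (fun k => k.length) true) word.toList
    let sm := pwMatchSuffix (PySem.List.sorted pwSUFFIX.keys (fun k => k.length) true) pr.2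
    (pr.1.map String.ofList, some (String.ofList sm.2), sm.1.map String.ofList)

-- ===== PORT B =====
-- B's first loop: for L in (3, 2): if word[:L] in PREFIX: break
def pwAltPre : List Nat → List Char → Option (List Char) × List Char
  | [], w => (none, w)
  | L :: Ls, w =>
    if pwPREFIX.contains (PySem.List.slice w none (some (L : Int))) then
      (some (PySem.List.slice w none (some (L : Int))), PySem.List.slice w (some (L : Int)) none)
    else pwAltPre Ls w

-- B's second loop: for L in (4, 3, 2, 1): if len(rest) > L and rest[-L:] in SUFFIX: break
def pwAltSuf : List Nat → List Char → Option (List Char) × List Char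
  | [], r => (none, r)
  | L :: Ls, r =>
    if decide (L < r.length) && pwSUFFIX.contains (PySem.List.slice r (some (-(L : Int))) none) then
      (some (PySem.List.slice r (some (-(L : Int))) none), PySem.List.slice r none (some (-(L : Int))))
    else pwAltSuf Ls r

def parse_word_alt (word : String) : Option String × Option String × Option String :=
  if word = "" ∨ PySem.Str.len word < 2 then (none, some word, none)
  else
    let pr := pwAltPre [3, 2] word.toList
    let sm := pwAltSuf [4, 3, 2, 1] pr.2
    (pr.1.map String.ofList, some (String.ofList sm.2), sm.1.map String.ofList)

-- ===== PRECONDITION & SPEC =====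
def Spec_parse_word (word : String) (out : Option String × Option String × Option String) : Prop := out = parse_word_alt word
instance (word : String) (out : Option String × Option String × Option String) : Decidable (Spec_parse_word word out) := by unfold Spec_parse_word; infer_instance

-- ===== CLAIM (what is proved, stated in full; the proofs are below) =====
def Claim_equal_parse_word : Prop := ∀ (word : String), Dom_parse_word word → Spec_parse_word word (parse_word word)

-- ===== LEMMAS AND PROOFS =====

-- the length-2 prefix keys, in PREFIX insertion order
def pwLP2 : List (List Char) :=
  ["ot".toList, "ok".toList, "ar".toList, "al".toList, "yk".toList, "yt".toList, "or".toList,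
   "qo".toList, "ol".toList, "so".toList, "ct".toList, "da".toList, "ch".toList, "sh".toList,
   "lk".toList, "op".toList, "pc".toList, "sa".toList]

def pwLS3 : List (List Char) := ["ain".toList, "iin".toList]
def pwLS2 : List (List Char) :=
  ["in".toList, "dy".toList, "ey".toList, "hy".toList, "ky".toList, "ly".toList, "ty".toList,
   "ry".toList, "ar".toList, "or".toList, "al".toList, "ol".toList]

-- common normal form of the prefix stage
def pwPreNF (w : List Char) : Option (List Char) × List Char :=
  if w.take 3 = "cth".toList then (some (w.take 3), w.drop 3)
  else if w.take 2 ∈ pwLP2 then (some (w.take 2), w.drop 2)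
  else (none, w)

-- common normal form of the suffix stage
def pwSufNF (r : List Char) : Option (List Char) × List Char :=
  if 4 < r.length ∧ r.drop (r.length - 4) = "aiin".toList then (some (r.drop (r.length - 4)), r.take (r.length - 4))
  else if 3 < r.length ∧ r.drop (r.length - 3) ∈ pwLS3 then (some (r.drop (r.length - 3)), r.take (r.length - 3))
  else if 2 < r.length ∧ r.drop (r.length - 2) ∈ pwLS2 then (some (r.drop (r.length - 2)), r.take (r.length - 2))
  else if 1 < r.length ∧ r.drop (r.length - 1) = "y".toList then (some (r.drop (r.length - 1)), r.take (r.length - 1))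
  else (none, r)

set_option maxHeartbeats 2000000 in
lemma pwSortP : PySem.List.sorted pwPREFIX.keys (fun k => k.length) true =
    ["cth".toList] ++ (pwLP2 ++ []) := by decide

set_option maxHeartbeats 2000000 in
lemma pwSortS : PySem.List.sorted pwSUFFIX.keys (fun k => k.length) true =
    ["aiin".toList] ++ (pwLS3 ++ (pwLS2 ++ (["y".toList] ++ []))) := by decide

set_option maxHeartbeats 2000000 in
lemma pwPermKP : pwPREFIX.keys.Perm ("cth".toList :: pwLP2) := by decide

set_option maxHeartbeats 2000000 in
lemma pwPermKS : pwSUFFIX.keys.Perm ("aiin".toList :: (pwLS3 ++ (pwLS2 ++ ["y".toList]))) := by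
  decide

lemma pwMemKP (c : List Char) : c ∈ pwPREFIX.keys ↔ c = "cth".toList ∨ c ∈ pwLP2 := by
  rw [pwPermKP.mem_iff, List.mem_cons]

lemma pwMemKS (c : List Char) :
    c ∈ pwSUFFIX.keys ↔ c = "aiin".toList ∨ c ∈ pwLS3 ∨ c ∈ pwLS2 ∨ c = "y".toList := by
  rw [pwPermKS.mem_iff]
  simp [List.mem_cons, List.mem_append]

-- A's prefix loop over a block of equal-length keys is a take-and-lookup
lemma pwChainP (ks rest : List (List Char)) (L : Nat) (w : List Char)
    (h : ∀ k ∈ ks, k.length = L) :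
    pwMatchPrefix (ks ++ rest) w =
      if w.take L ∈ ks then (some (w.take L), w.drop L) else pwMatchPrefix rest w := by
  induction ks with
  | nil => simp
  | cons k ks ih =>
    have hk : k.length = L := h k (by simp)
    by_cases hw : w.take L = k
    · have hsw : PySem.Chars.startswith w k = true := by
        rw [PySem.Chars.startswith_iff, List.prefix_iff_eq_take, hk, hw]
      simp [pwMatchPrefix, hsw, hw, hk, PySem.List.slice_from_natCast]
    · have hsw : PySem.Chars.startswith w k = false := by
        rw [Bool.eq_false_iff, Ne, PySem.Chars.startswith_iff, List.prefix_iff_eq_take, hk]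
        exact fun hc => hw hc.symm
      rw [List.cons_append]
      simp only [pwMatchPrefix, hsw, Bool.false_eq_true, if_false]
      rw [ih (fun x hx => h x (List.mem_cons_of_mem _ hx))]
      simp [List.mem_cons, hw]

-- A's suffix loop over a block of equal-length keys is a drop-and-lookup
lemma pwChainS (ks rest : List (List Char)) (L : Nat) (hL : 0 < L) (w : List Char)
    (h : ∀ k ∈ ks, k.length = L) :
    pwMatchSuffix (ks ++ rest) w =
      if L < w.length ∧ w.drop (w.length - L) ∈ ks then
        (some (w.drop (w.length - L)), w.take (w.length - L))
      else pwMatchSuffix rest w := by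
  induction ks with
  | nil => simp
  | cons k ks ih =>
    have hk : k.length = L := h k (by simp)
    have ih' := ih (fun x hx => h x (List.mem_cons_of_mem _ hx))
    rw [List.cons_append]
    by_cases hdk : w.drop (w.length - L) = k
    · have hes : PySem.Chars.endswith w k = true := by
        rw [PySem.Chars.endswith_iff, List.suffix_iff_eq_drop, hk, hdk]
      by_cases hlw : L < w.length
      · simp only [pwMatchSuffix, hes, hk, Bool.true_and]
        rw [if_pos (decide_eq_true hlw), if_pos ⟨hlw, hdk ▸ List.mem_cons_self⟩, ← hdk,
          PySem.List.slice_to_neg_natCast _ _ hL]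
      · simp only [pwMatchSuffix, hes, hk, Bool.true_and]
        rw [if_neg (by simp [hlw]), ih', if_neg (fun hc => hlw hc.1),
          if_neg (fun hc => hlw hc.1)]
    · have hes : PySem.Chars.endswith w k = false := by
        rw [Bool.eq_false_iff, Ne, PySem.Chars.endswith_iff, List.suffix_iff_eq_drop, hk]
        exact fun hc => hdk hc.symm
      simp only [pwMatchSuffix, hes, Bool.false_and, Bool.false_eq_true, if_false]
      rw [ih']
      simp [List.mem_cons, hdk]

-- key-length facts used for the membership splits
lemma pwLP2_len : ∀ k ∈ pwLP2, k.length = 2 := by decide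
lemma pwLS3_len : ∀ k ∈ pwLS3, k.length = 3 := by decide
lemma pwLS2_len : ∀ k ∈ pwLS2, k.length = 2 := by decide

-- one step of B's prefix loop, as a conditional on the take
lemma pwAltPreStep (L : Nat) (Ls : List Nat) (w : List Char) :
    pwAltPre (L :: Ls) w =
      if pwPREFIX.contains (w.take L) then (some (w.take L), w.drop L)
      else pwAltPre Ls w := by
  rw [pwAltPre, PySem.List.slice_to_natCast, PySem.List.slice_from_natCast]

-- B's prefix loop equals the normal form
lemma pwAltPreNF (w : List Char) : pwAltPre [3, 2] w = pwPreNF w := by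
  have hunf : pwAltPre [3, 2] w =
      if pwPREFIX.contains (w.take 3) then (some (w.take 3), w.drop 3)
      else if pwPREFIX.contains (w.take 2) then (some (w.take 2), w.drop 2)
      else (none, w) := by
    rw [pwAltPreStep, pwAltPreStep]
    simp only [pwAltPre]
  rw [hunf]
  by_cases h3 : w.take 3 = "cth".toList
  · have hc : pwPREFIX.contains (w.take 3) = true :=
      (PySem.Dict.contains_iff_mem_keys _ _).mpr ((pwMemKP _).mpr (Or.inl h3))
    rw [hc, if_pos rfl, pwPreNF, if_pos h3]
  · by_cases h2 : w.take 3 ∈ pwLP2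
    · have hlen2 : (w.take 3).length = 2 := pwLP2_len _ h2
      have hwlen : w.length = 2 := by rw [List.length_take] at hlen2; omega
      have htw : w.take 3 = w := List.take_of_length_le (by omega)
      have ht2 : w.take 2 = w := List.take_of_length_le (by omega)
      have hc : pwPREFIX.contains (w.take 3) = true :=
        (PySem.Dict.contains_iff_mem_keys _ _).mpr ((pwMemKP _).mpr (Or.inr h2))
      have hd3 : w.drop 3 = [] := List.drop_eq_nil_of_le (by omega)
      have hd2 : w.drop 2 = [] := List.drop_eq_nil_of_le (by omega)
      have hw2 : w ∈ pwLP2 := htw ▸ h2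
      have hmem2 : w.take 2 ∈ pwLP2 := by rw [ht2]; exact hw2
      rw [hc, if_pos rfl, pwPreNF, if_neg h3, if_pos hmem2, htw, ht2, hd3, hd2]
    · have hc3 : pwPREFIX.contains (w.take 3) = false := by
        rw [Bool.eq_false_iff, Ne, PySem.Dict.contains_iff_mem_keys, pwMemKP]
        rintro (hx | hx)
        · exact h3 hx
        · exact h2 hx
      by_cases h2' : w.take 2 ∈ pwLP2
      · have hc2 : pwPREFIX.contains (w.take 2) = true :=
          (PySem.Dict.contains_iff_mem_keys _ _).mpr ((pwMemKP _).mpr (Or.inr h2'))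
        rw [hc3, if_neg Bool.false_ne_true, hc2, if_pos rfl, pwPreNF, if_neg h3, if_pos h2']
      · have hc2 : pwPREFIX.contains (w.take 2) = false := by
          rw [Bool.eq_false_iff, Ne, PySem.Dict.contains_iff_mem_keys, pwMemKP]
          rintro (hx | hx)
          · have hx3 : (w.take 2).length = 3 := by rw [hx]; decide
            rw [List.length_take] at hx3; omega
          · exact h2' hx
        rw [hc3, if_neg Bool.false_ne_true, hc2, if_neg Bool.false_ne_true, pwPreNF,
          if_neg h3, if_neg h2']

-- one step of B's suffix loop, as a conditional on Props
lemma pwAltSufStep (L : Nat) (hL : 0 < L) (Ls : List Nat) (r : List Char) :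
    pwAltSuf (L :: Ls) r =
      if L < r.length ∧ r.drop (r.length - L) ∈ pwSUFFIX.keys then
        (some (r.drop (r.length - L)), r.take (r.length - L))
      else pwAltSuf Ls r := by
  have hsl : PySem.List.slice r (some (-(L : Int))) none = r.drop (r.length - L) :=
    PySem.List.slice_from_neg_natCast _ _ hL
  have hsl2 : PySem.List.slice r none (some (-(L : Int))) = r.take (r.length - L) :=
    PySem.List.slice_to_neg_natCast _ _ hL
  by_cases hc : L < r.length ∧ r.drop (r.length - L) ∈ pwSUFFIX.keys
  · have hcont : pwSUFFIX.contains (PySem.List.slice r (some (-(L : Int))) none) = true := by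
      rw [hsl]; exact (PySem.Dict.contains_iff_mem_keys _ _).mpr hc.2
    rw [pwAltSuf, hcont, if_pos hc]
    simp [hc.1, hsl, hsl2]
  · rw [pwAltSuf, if_neg hc]
    rcases Decidable.not_and_iff_not_or_not.mp hc with h1 | h1
    · simp [h1]
    · have : pwSUFFIX.contains (PySem.List.slice r (some (-(L : Int))) none) = false := by
        rw [Bool.eq_false_iff, Ne, hsl, PySem.Dict.contains_iff_mem_keys]
        exact h1
      simp [this]

-- B's suffix loop equals the normal form
lemma pwAltSufNF (r : List Char) : pwAltSuf [4, 3, 2, 1] r = pwSufNF r := by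
  have hdl : ∀ L : Nat, L < r.length → (r.drop (r.length - L)).length = L := by
    intro L hl; rw [List.length_drop]; omega
  have h4 : (4 < r.length ∧ r.drop (r.length - 4) ∈ pwSUFFIX.keys) ↔
      (4 < r.length ∧ r.drop (r.length - 4) = "aiin".toList) := by
    constructor
    · rintro ⟨hl, hm⟩
      refine ⟨hl, ?_⟩
      rcases (pwMemKS _).mp hm with hx | hx | hx | hx
      · exact hx
      · have := pwLS3_len _ hx; have := hdl 4 hl; omega
      · have := pwLS2_len _ hx; have := hdl 4 hl; omega
      · have h1 : (r.drop (r.length - 4)).length = 1 := by rw [hx]; decide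
        have := hdl 4 hl; omega
    · rintro ⟨hl, hm⟩; exact ⟨hl, (pwMemKS _).mpr (Or.inl hm)⟩
  have h3 : (3 < r.length ∧ r.drop (r.length - 3) ∈ pwSUFFIX.keys) ↔
      (3 < r.length ∧ r.drop (r.length - 3) ∈ pwLS3) := by
    constructor
    · rintro ⟨hl, hm⟩
      refine ⟨hl, ?_⟩
      rcases (pwMemKS _).mp hm with hx | hx | hx | hx
      · have h1 : (r.drop (r.length - 3)).length = 4 := by rw [hx]; decide
        have := hdl 3 hl; omega
      · exact hx
      · have := pwLS2_len _ hx; have := hdl 3 hl; omega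
      · have h1 : (r.drop (r.length - 3)).length = 1 := by rw [hx]; decide
        have := hdl 3 hl; omega
    · rintro ⟨hl, hm⟩; exact ⟨hl, (pwMemKS _).mpr (Or.inr (Or.inl hm))⟩
  have h2 : (2 < r.length ∧ r.drop (r.length - 2) ∈ pwSUFFIX.keys) ↔
      (2 < r.length ∧ r.drop (r.length - 2) ∈ pwLS2) := by
    constructor
    · rintro ⟨hl, hm⟩
      refine ⟨hl, ?_⟩
      rcases (pwMemKS _).mp hm with hx | hx | hx | hx
      · have h1 : (r.drop (r.length - 2)).length = 4 := by rw [hx]; decide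
        have := hdl 2 hl; omega
      · have := pwLS3_len _ hx; have := hdl 2 hl; omega
      · exact hx
      · have h1 : (r.drop (r.length - 2)).length = 1 := by rw [hx]; decide
        have := hdl 2 hl; omega
    · rintro ⟨hl, hm⟩; exact ⟨hl, (pwMemKS _).mpr (Or.inr (Or.inr (Or.inl hm)))⟩
  have h1 : (1 < r.length ∧ r.drop (r.length - 1) ∈ pwSUFFIX.keys) ↔
      (1 < r.length ∧ r.drop (r.length - 1) = "y".toList) := by
    constructor
    · rintro ⟨hl, hm⟩
      refine ⟨hl, ?_⟩
      rcases (pwMemKS _).mp hm with hx | hx | hx | hx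
      · have hx1 : (r.drop (r.length - 1)).length = 4 := by rw [hx]; decide
        have := hdl 1 hl; omega
      · have := pwLS3_len _ hx; have := hdl 1 hl; omega
      · have := pwLS2_len _ hx; have := hdl 1 hl; omega
      · exact hx
    · rintro ⟨hl, hm⟩; exact ⟨hl, (pwMemKS _).mpr (Or.inr (Or.inr (Or.inr hm)))⟩
  rw [pwAltSufStep 4 (by norm_num), pwAltSufStep 3 (by norm_num),
    pwAltSufStep 2 (by norm_num), pwAltSufStep 1 (by norm_num), pwSufNF,
    show pwAltSuf [] r = (none, r) from rfl]
  exact if_congr h4 rfl (if_congr h3 rfl (if_congr h2 rfl (if_congr h1 rfl rfl)))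

-- A's loops equal the normal forms
lemma pwMatchPreNF (w : List Char) :
    pwMatchPrefix (PySem.List.sorted pwPREFIX.keys (fun k => k.length) true) w = pwPreNF w := by
  rw [pwSortP, pwChainP ["cth".toList] _ 3 w (by decide),
    pwChainP pwLP2 [] 2 w pwLP2_len, pwPreNF]
  simp [pwMatchPrefix]

lemma pwMatchSufNF (r : List Char) :
    pwMatchSuffix (PySem.List.sorted pwSUFFIX.keys (fun k => k.length) true) r = pwSufNF r := by
  rw [pwSortS, pwChainS ["aiin".toList] _ 4 (by norm_num) r (by decide),
    pwChainS pwLS3 _ 3 (by norm_num) r pwLS3_len,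
    pwChainS pwLS2 _ 2 (by norm_num) r pwLS2_len,
    pwChainS ["y".toList] [] 1 (by norm_num) r (by decide), pwSufNF]
  simp only [pwMatchSuffix, List.mem_singleton]

-- ===== VERDICT (by name: the statement is the Claim_ definition above) =====
theorem parse_word_spec : Claim_equal_parse_word := by
  intro word _
  unfold Spec_parse_word
  simp only [parse_word, parse_word_alt]
  by_cases hg : word = "" ∨ PySem.Str.len word < 2
  · rw [if_pos hg, if_pos hg]
  · rw [if_neg hg, if_neg hg, pwMatchPreNF, pwMatchSufNF, pwAltPreNF, pwAltSufNF]
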